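-- pv_equiv track=rewrite | github.com/MrBoom202/python-practice | ex5.py | cammel_kebab_string
-- ===== SOURCE A (Python) =====
-- def cammel_kebab_string(input):
--     list_of_letters = list(input)
--     for index in range(len(list_of_letters)):
--             if index % 2 == 0:
--                 list_of_letters[index] = str(list_of_letters[index]).upper()
--             else:
--                 list_of_letters[index]  = str(list_of_letters[index]).lower()
--
--
--     return (''.join(list_of_letters)).replace(" ","-")
-- ===== SOURCE B (Python) =====
-- def cammel_kebab_string(input):
--     out = []
--     it = iter(input)
--     for a in it:
--         out.append(a.upper())
--         b = next(it, None)
--         if b is not None: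
--             out.append(b.lower())
--     return ''.join(out).replace(" ", "-")
-- ===== Notes on version B (the rewrite author's own statement) =====
-- stated objective: alternative
-- what changed: B consumes the string two characters at a time from one iterator (upper the first, lower the second of each pair), instead of A's index loop over range(len) with parity tests and in-place list mutation.
import Mathlib
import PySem

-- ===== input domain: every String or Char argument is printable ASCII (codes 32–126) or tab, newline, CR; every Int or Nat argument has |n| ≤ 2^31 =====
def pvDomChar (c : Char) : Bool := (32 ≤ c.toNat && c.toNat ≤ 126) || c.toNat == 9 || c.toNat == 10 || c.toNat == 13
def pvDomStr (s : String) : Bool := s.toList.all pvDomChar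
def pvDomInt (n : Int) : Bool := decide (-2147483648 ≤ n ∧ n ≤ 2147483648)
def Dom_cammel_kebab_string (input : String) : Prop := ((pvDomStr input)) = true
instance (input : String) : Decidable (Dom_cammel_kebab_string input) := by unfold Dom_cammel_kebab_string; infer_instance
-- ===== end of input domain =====

-- B walks the characters two at a time (upper/lower per pair) instead of A's index loop with parity tests;
-- same cost, different decomposition (objective: alternative).

-- ===== PORT A =====
-- str(c).upper()/.lower() on a one-char string is Chars.upperChar/lowerChar (exact on the ASCII domain)
def cammel_kebab_string (input : String) : String :=
  let list_of_letters := input.toList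
  let folded := (PySem.List.pyRange 0 (PySem.List.len list_of_letters) 1).foldl
    (fun lst index =>
      if index % 2 == 0 then
        PySem.List.pySetD lst index (PySem.Chars.upperChar (PySem.List.pyGetD lst index ' '))
      else
        PySem.List.pySetD lst index (PySem.Chars.lowerChar (PySem.List.pyGetD lst index ' ')))
    list_of_letters
  PySem.Str.replace (String.ofList folded) " " "-"

-- ===== PORT B =====
def pvAltPairs : List Char → List Char
  | [] => []
  | [a] => [PySem.Chars.upperChar a]
  | a :: b :: rest => PySem.Chars.upperChar a :: PySem.Chars.lowerChar b :: pvAltPairs rest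

def cammel_kebab_string_alt (input : String) : String :=
  PySem.Str.replace (String.ofList (pvAltPairs input.toList)) " " "-"

-- ===== PRECONDITION & SPEC =====
def Spec_cammel_kebab_string (input : String) (out : String) : Prop := out = cammel_kebab_string_alt input
instance (input : String) (out : String) : Decidable (Spec_cammel_kebab_string input out) := by unfold Spec_cammel_kebab_string; infer_instance

-- ===== CLAIM (what is proved, stated in full; the proofs are below) =====
def Claim_equal_cammel_kebab_string : Prop := ∀ (input : String), Dom_cammel_kebab_string input → Spec_cammel_kebab_string input (cammel_kebab_string input)

-- ===== LEMMAS AND PROOFS =====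

-- one-at-a-time alternating case, starting at position k: the result of A's loop
def pvAltK (k : Nat) : List Char → List Char
  | [] => []
  | c :: rest =>
      (if k % 2 == 0 then PySem.Chars.upperChar c else PySem.Chars.lowerChar c) :: pvAltK (k + 1) rest

theorem pvFold (cs pre : List Char) :
    (PySem.List.pyRange (pre.length : Int) ((pre.length : Int) + cs.length) 1).foldl
      (fun lst index =>
        if index % 2 == 0 then
          PySem.List.pySetD lst index (PySem.Chars.upperChar (PySem.List.pyGetD lst index ' '))
        else
          PySem.List.pySetD lst index (PySem.Chars.lowerChar (PySem.List.pyGetD lst index ' ')))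
      (pre ++ cs)
    = pre ++ pvAltK pre.length cs := by
  induction cs generalizing pre with
  | nil => simp [PySem.List.pyRange_one_eq_nil, pvAltK]
  | cons c rest ih =>
      have hlt : (pre.length : Int) < (pre.length : Int) + (c :: rest).length := by
        simp
      rw [PySem.List.pyRange_one_cons hlt]
      simp only [List.foldl_cons]
      have hget : PySem.List.pyGetD (pre ++ c :: rest) (pre.length : Int) ' ' = c := by
        simp [PySem.List.pyGetD_natCast, List.getD]
      have hset : ∀ v : Char,
          PySem.List.pySetD (pre ++ c :: rest) (pre.length : Int) v = pre ++ v :: rest := by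
        intro v
        rw [PySem.List.pySetD_natCast, List.set_append]
        simp
      have hmod : (((pre.length : Int) % 2 == 0) = true) ↔ pre.length % 2 = 0 := by
        simp only [beq_iff_eq]; omega
      set v : Char := if pre.length % 2 == 0 then PySem.Chars.upperChar c else PySem.Chars.lowerChar c with hv
      have hstep :
          (if (pre.length : Int) % 2 == 0 then
            PySem.List.pySetD (pre ++ c :: rest) (pre.length : Int)
              (PySem.Chars.upperChar (PySem.List.pyGetD (pre ++ c :: rest) (pre.length : Int) ' '))
          else
            PySem.List.pySetD (pre ++ c :: rest) (pre.length : Int)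
              (PySem.Chars.lowerChar (PySem.List.pyGetD (pre ++ c :: rest) (pre.length : Int) ' ')))
          = pre ++ v :: rest := by
        rw [hget]
        by_cases h : pre.length % 2 = 0
        · rw [if_pos (hmod.mpr h), hset, hv, if_pos (by simpa using h)]
        · rw [if_neg (fun hc => h (hmod.mp hc)), hset, hv, if_neg (by simpa using h)]
      rw [hstep]
      have hcons : pre ++ v :: rest = (pre ++ [v]) ++ rest := by simp
      have hrange : (pre.length : Int) + 1 = ((pre ++ [v]).length : Int) := by simp
      have hrange2 : (pre.length : Int) + ((c :: rest).length : Int)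
          = ((pre ++ [v]).length : Int) + (rest.length : Int) := by
        simp [List.length_append]; omega
      rw [hcons, hrange, hrange2, ih (pre ++ [v])]
      simp [pvAltK, hv]

theorem pvAltK_eq (cs : List Char) (k : Nat) (hk : k % 2 = 0) : pvAltK k cs = pvAltPairs cs := by
  induction cs using pvAltPairs.induct generalizing k with
  | case1 => simp [pvAltK, pvAltPairs]
  | case2 a => simp [pvAltK, pvAltPairs, hk]
  | case3 a b rest ih =>
      have h1 : (k + 1) % 2 = 1 := by omega
      simp [pvAltK, pvAltPairs, hk, h1, ih (k + 2) (by omega)]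

-- ===== VERDICT (by name: the statement is the Claim_ definition above) =====
theorem cammel_kebab_string_spec : Claim_equal_cammel_kebab_string := by
  intro input _
  unfold Spec_cammel_kebab_string cammel_kebab_string cammel_kebab_string_alt
  have h := pvFold input.toList []
  simp only [List.nil_append, List.length_nil, Nat.cast_zero, zero_add] at h
  simp only [PySem.List.len]
  rw [h, pvAltK_eq _ 0 rfl]
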